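-- pv_equiv track=rewrite | github.com/yibozhou0505/Python-course-homework | modelisation/3.5/ex20.py | est_monotone
-- ===== SOURCE A (Python) =====
-- def est_monotone(L):
--     if not L:
--         return True
--     est_croissant = True
--     est_decroissant = True
--     for i in range(1, len(L)):
--         if L[i] < L[i - 1]:
--             est_croissant = False
--         if L[i] > L[i - 1]:
--             est_decroissant = False
--     return est_croissant or est_decroissant
-- ===== SOURCE B (Python) =====
-- def est_monotone(L):
--     S = sorted(L)
--     return L == S or L == S[::-1]
-- ===== Notes on version B (the rewrite author's own statement) =====
-- stated objective: alternative
-- what changed: Instead of scanning adjacent pairs with two flags, B sorts the list once and checks whether L equals its stable sort or the reverse of it (a non-decreasing list is a fixed point of a stable sort; a non-increasing one is the reverse of its sort).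
import Mathlib
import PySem

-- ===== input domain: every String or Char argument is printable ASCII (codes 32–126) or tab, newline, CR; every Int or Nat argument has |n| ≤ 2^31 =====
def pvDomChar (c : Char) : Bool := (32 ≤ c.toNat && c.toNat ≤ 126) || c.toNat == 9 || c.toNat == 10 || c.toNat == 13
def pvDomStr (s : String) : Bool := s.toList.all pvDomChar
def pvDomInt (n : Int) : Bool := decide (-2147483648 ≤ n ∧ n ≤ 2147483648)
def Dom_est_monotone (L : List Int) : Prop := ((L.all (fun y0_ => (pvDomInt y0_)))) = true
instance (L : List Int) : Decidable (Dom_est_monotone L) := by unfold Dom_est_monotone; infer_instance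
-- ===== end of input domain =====

-- B replaces A's adjacent-pair flag loop by a sort-based check (alternative algorithm, not faster):
-- L is monotone iff it equals its stable sort or the reverse of its stable sort.

-- ===== PORT A =====
def est_monotone (L : List Int) : Bool :=
  if L = [] then true
  else
    let flags :=
      (PySem.List.pyRange 1 (L.length : Int) 1).foldl
        (fun (st : Bool × Bool) i =>
          (if PySem.List.pyGetD L i 0 < PySem.List.pyGetD L (i - 1) 0 then false else st.1,
           if PySem.List.pyGetD L i 0 > PySem.List.pyGetD L (i - 1) 0 then false else st.2))
        (true, true)
    flags.1 || flags.2

-- ===== PORT B =====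
-- S[::-1] is ported as S.reverse (exact for step -1 full slice).
def est_monotone_alt (L : List Int) : Bool :=
  let S := PySem.List.sorted L (fun x => x) false
  decide (L = S) || decide (L = S.reverse)

-- ===== PRECONDITION & SPEC =====
def Spec_est_monotone (L : List Int) (out : Bool) : Prop := out = est_monotone_alt L
instance (L : List Int) (out : Bool) : Decidable (Spec_est_monotone L out) := by unfold Spec_est_monotone; infer_instance

-- ===== CLAIM (what is proved, stated in full; the proofs are below) =====
def Claim_equal_est_monotone : Prop := ∀ (L : List Int), Dom_est_monotone L → Spec_est_monotone L (est_monotone L)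

-- ===== LEMMAS AND PROOFS =====

-- A's loop maintains the two flags as independent conjunctions over the visited indices.
lemma foldl_flags (g : Int → Int) (I : List Int) (a b : Bool) :
    I.foldl
      (fun (st : Bool × Bool) i =>
        (if g i < g (i - 1) then false else st.1,
         if g i > g (i - 1) then false else st.2))
      (a, b)
    = (a && I.all (fun i => !decide (g i < g (i - 1))),
       b && I.all (fun i => !decide (g i > g (i - 1)))) := by
  induction I generalizing a b with
  | nil => simp
  | cons x xs ih =>
      simp only [List.foldl_cons, List.all_cons, ih, Prod.mk.injEq]
      constructor <;> by_cases h1 : g x < g (x - 1) <;> by_cases h2 : g (x - 1) < g x <;>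
        simp [h1, h2]

lemma pyGetD_nat (L : List Int) (k : Nat) (hk : k < L.length) :
    PySem.List.pyGetD L (k : Int) 0 = L[k] := by
  rw [PySem.List.pyGetD_eq_getElem L 0 (by omega) (by exact_mod_cast hk)]
  simp

-- "all adjacent comparisons over range(1, len)" is the adjacent-index condition.
lemma all_pyRange_iff_adj (L : List Int) (p : Int → Int → Bool) :
    (((PySem.List.pyRange 1 (L.length : Int) 1).all
        (fun i => p (PySem.List.pyGetD L (i - 1) 0) (PySem.List.pyGetD L i 0))) = true)
    ↔ (∀ k : Nat, (h : k + 1 < L.length) → p L[k] L[k + 1] = true) := by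
  simp only [List.all_eq_true]
  constructor
  · intro h k hk
    have := h ((k : Int) + 1) (by
      rw [PySem.List.mem_pyRange_one]
      constructor <;> [omega; exact_mod_cast by omega])
    have e1 : PySem.List.pyGetD L ((k : Int) + 1 - 1) 0 = L[k] := by
      rw [show ((k : Int) + 1 - 1) = (k : Int) by ring, pyGetD_nat L k (by omega)]
    have e2 : PySem.List.pyGetD L ((k : Int) + 1) 0 = L[k + 1] := by
      rw [show ((k : Int) + 1) = ((k + 1 : Nat) : Int) by push_cast; ring,
        pyGetD_nat L (k + 1) hk]
    rw [e1, e2] at this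
    exact this
  · intro h i hi
    rw [PySem.List.mem_pyRange_one] at hi
    obtain ⟨h1, h2⟩ := hi
    obtain ⟨k, hik⟩ : ∃ k : Nat, i = (k : Int) + 1 := ⟨(i - 1).toNat, by omega⟩
    subst hik
    have hk : k + 1 < L.length := by omega
    have e1 : PySem.List.pyGetD L ((k : Int) + 1 - 1) 0 = L[k] := by
      rw [show ((k : Int) + 1 - 1) = (k : Int) by ring, pyGetD_nat L k (by omega)]
    have e2 : PySem.List.pyGetD L ((k : Int) + 1) 0 = L[k + 1] := by
      rw [show ((k : Int) + 1) = ((k + 1 : Nat) : Int) by push_cast; ring,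
        pyGetD_nat L (k + 1) hk]
    rw [e1, e2]
    exact h k hk

-- Adjacent condition ↔ Pairwise, for a transitive reflexive-friendly relation (≤ on Int).
lemma adj_iff_pairwise_le (L : List Int) :
    (∀ k : Nat, (h : k + 1 < L.length) → L[k] ≤ L[k + 1]) ↔ L.Pairwise (· ≤ ·) := by
  rw [← List.isChain_iff_pairwise, List.isChain_iff_getElem]

lemma adj_iff_pairwise_ge (L : List Int) :
    (∀ k : Nat, (h : k + 1 < L.length) → L[k + 1] ≤ L[k]) ↔ L.Pairwise (fun a b => b ≤ a) := by
  rw [← List.isChain_iff_pairwise, List.isChain_iff_getElem]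

-- B's sort-based tests name the same two orderings.
lemma eq_sorted_iff (L : List Int) :
    (L = PySem.List.sorted L (fun x => x) false) ↔ L.Pairwise (· ≤ ·) := by
  constructor
  · intro h
    have := PySem.List.sorted_pairwise L (fun x => x)
    rw [← h] at this
    simpa using this
  · intro h
    exact (PySem.List.sorted_eq_self_of_pairwise L (fun x => x) (by simpa using h)).symm

lemma eq_sorted_rev_iff (L : List Int) :
    (L = (PySem.List.sorted L (fun x => x) false).reverse) ↔ L.Pairwise (fun a b => b ≤ a) := by
  constructor
  · intro h
    have := PySem.List.sorted_pairwise L (fun x => x)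
    have hrev : (PySem.List.sorted L (fun x => x) false).reverse.Pairwise (fun a b => b ≤ a) := by
      rw [List.pairwise_reverse]; simpa using this
    rw [← h] at hrev
    exact hrev
  · intro h
    have hp : L.reverse.Perm L := List.reverse_perm L
    have hpw : L.reverse.Pairwise (· ≤ ·) := by
      rw [List.pairwise_reverse]; exact h
    have := PySem.List.sorted_id_eq_of_perm_of_pairwise L L.reverse hp hpw
    rw [this, List.reverse_reverse]

-- ===== VERDICT (by name: the statement is the Claim_ definition above) =====
theorem est_monotone_spec : Claim_equal_est_monotone := by
  intro L _
  unfold Spec_est_monotone est_monotone est_monotone_alt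
  by_cases hL : L = []
  · subst hL; simp [PySem.List.sorted]
  · simp only [hL, if_false]
    rw [foldl_flags (fun i => PySem.List.pyGetD L i 0)]
    simp only [Bool.true_and]
    rw [Bool.eq_iff_iff]
    simp only [Bool.or_eq_true, decide_eq_true_eq]
    have h1 := all_pyRange_iff_adj L (fun a b => !decide (b < a))
    have h2 := all_pyRange_iff_adj L (fun a b => !decide (b > a))
    simp only [Bool.not_eq_eq_eq_not, Bool.not_true, decide_eq_false_iff_not, not_lt, gt_iff_lt] at h1 h2
    rw [h1, h2, adj_iff_pairwise_le, adj_iff_pairwise_ge,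
      ← eq_sorted_iff, ← eq_sorted_rev_iff]
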